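-- pv_equiv track=rewrite | github.com/freshmre/advent-of-code2015 | day05.py | r3
-- ===== SOURCE A (Python) =====
-- def r3(pw):
--     p = c = 0
--     while p < (len(pw) - 1):
--         if pw[p] == pw[p+1]:
--             c += 1
--             p += 2
--         else:
--             p += 1
--     return c >= 2
-- ===== SOURCE B (Python) =====
-- def r3(pw):
--     # run-length formulation: each maximal run of equal chars of length L
--     # contributes L // 2 non-overlapping pairs; pairs never cross runs.
--     total = 0
--     i = 0
--     n = len(pw)
--     while i < n:
--         j = i
--         while j < n and pw[j] == pw[i]:
--             j += 1
--         total += (j - i) // 2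
--         i = j
--     return total >= 2
-- ===== Notes on version B (the rewrite author's own statement) =====
-- stated objective: alternative
-- what changed: Replaces the greedy index-skipping while-loop (advance by 2 on a match, 1 otherwise) with a run-length scan: split the string into maximal runs of equal characters and sum floor(run_length/2) per run, then compare with 2.
import Mathlib
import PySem

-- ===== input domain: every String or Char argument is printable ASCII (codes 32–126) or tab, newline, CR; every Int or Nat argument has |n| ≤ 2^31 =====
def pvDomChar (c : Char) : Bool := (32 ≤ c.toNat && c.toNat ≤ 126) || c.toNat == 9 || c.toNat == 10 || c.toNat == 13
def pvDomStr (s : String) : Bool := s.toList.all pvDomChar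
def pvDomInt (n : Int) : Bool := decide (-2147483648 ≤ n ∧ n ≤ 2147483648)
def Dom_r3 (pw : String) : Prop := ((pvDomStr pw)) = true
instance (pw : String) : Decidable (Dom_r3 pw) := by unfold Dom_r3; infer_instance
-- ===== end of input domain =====

-- B replaces A's greedy index-skipping loop with a run-length scan (sum of
-- floor(run_length/2) over maximal runs); same O(n) cost, return value only.

-- ===== PORT A =====
-- A's while-loop: compare pw[p] with pw[p+1]; on a match count and skip 2, else skip 1;
-- stop when fewer than two characters remain.  Ported as recursion consuming the char list.
def r3Loop : List Char → Int → Int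
  | [], c => c
  | [_], c => c
  | a :: b :: rest, c => if a == b then r3Loop rest (c + 1) else r3Loop (b :: rest) c

def r3 (pw : String) : Bool := decide ((2 : Int) ≤ r3Loop pw.toList 0)

-- ===== PORT B =====
-- inner while-loop of Source B: length of the leading run of `a` and the remainder
def bRun (a : Char) : List Char → Nat × List Char
  | [] => (0, [])
  | b :: l => if b == a then ((bRun a l).1 + 1, (bRun a l).2) else (0, b :: l)

theorem bRun_snd_length_le (a : Char) : ∀ l : List Char, (bRun a l).2.length ≤ l.length := by
  intro l
  induction l with
  | nil => simp [bRun]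
  | cons b l ih =>
    by_cases h : (b == a) = true
    · simp [bRun, h]; omega
    · simp [bRun, h]

-- outer while-loop of Source B: sum (run length)//2 over the maximal runs
def bPairs : List Char → Nat
  | [] => 0
  | a :: l => ((bRun a l).1 + 1) / 2 + bPairs (bRun a l).2
termination_by l => l.length
decreasing_by
  have := bRun_snd_length_le a l
  simp; omega

def r3_alt (pw : String) : Bool := decide (2 ≤ bPairs pw.toList)

-- ===== PRECONDITION & SPEC =====
def Spec_r3 (pw : String) (out : Bool) : Prop := out = r3_alt pw
instance (pw : String) (out : Bool) : Decidable (Spec_r3 pw out) := by unfold Spec_r3; infer_instance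

-- ===== CLAIM (what is proved, stated in full; the proofs are below) =====
def Claim_equal_r3 : Prop := ∀ (pw : String), Dom_r3 pw → Spec_r3 pw (r3 pw)

-- ===== LEMMAS AND PROOFS =====

-- dropping the leading run of `a` (and crediting its pairs) does not change bPairs
theorem bPairs_run (l : List Char) (a : Char) :
    bPairs l = (bRun a l).1 / 2 + bPairs (bRun a l).2 := by
  cases l with
  | nil => simp [bRun, bPairs]
  | cons b l =>
    by_cases h : (b == a) = true
    · have hb : b = a := by exact beq_iff_eq.mp h
      subst hb
      simp [bRun, bPairs]
    · simp [bRun, h, bPairs]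

theorem bPairs_pair (a : Char) (l : List Char) :
    bPairs (a :: a :: l) = 1 + bPairs l := by
  have h := bPairs_run l a
  simp [bPairs, bRun]
  omega

theorem bPairs_skip (a b : Char) (l : List Char) (h : ¬ a = b) :
    bPairs (a :: b :: l) = bPairs (b :: l) := by
  have hb : (b == a) = false := by
    simp [beq_eq_false_iff_ne]
    exact fun e => h e.symm
  simp [bPairs, bRun, hb]

theorem r3Loop_eq_bPairs : ∀ (l : List Char) (c : Int), r3Loop l c = c + (bPairs l : Int) := by
  intro l c
  induction l, c using r3Loop.induct with
  | case1 c => simp [r3Loop, bPairs]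
  | case2 c x => simp [r3Loop, bPairs, bRun]
  | case3 a b rest c hab ih =>
    have hb : a = b := beq_iff_eq.mp hab
    subst hb
    rw [r3Loop, if_pos (by simp), ih, bPairs_pair]
    push_cast
    ring
  | case4 a b rest c hab ih =>
    have hne : ¬ a = b := by simpa using hab
    rw [r3Loop, if_neg (by simpa using hne), ih, bPairs_skip a b rest hne]

-- ===== VERDICT (by name: the statement is the Claim_ definition above) =====
theorem r3_spec : Claim_equal_r3 := by
  intro pw _
  unfold Spec_r3 r3 r3_alt
  rw [r3Loop_eq_bPairs]
  simp
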